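-- pv_equiv track=rewrite | github.com/mumerbajwa/Final-Year-Project-NUTRICARE-App | BioGPT Fine of FYP/app.py | extract_and_format_answer
-- ===== SOURCE A (Python) =====
-- def extract_and_format_answer(response):
--     sections = {
--         "Malnutrition Risk Level": "",
--         "Key Deficiency Noticed": "",
--         "Immediate Advice": "",
--     }
--     for key in sections.keys():
--         start_idx = response.find(key)
--         if start_idx != -1:
--             end_idx = min(
--                 [response.find(k, start_idx + 1) for k in sections.keys() if response.find(k, start_idx + 1) != -1] + [len(response)]
--             )
--             sections[key] = response[start_idx + len(key) + 1:end_idx].strip()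
--     formatted_response = (
--         f"Malnutrition Risk Level:\n{sections['Malnutrition Risk Level']}\n\n"
--         f"Key Deficiency Noticed:\n{sections['Key Deficiency Noticed']}\n\n"
--         f"Immediate Advice:\n{sections['Immediate Advice']}"
--     )
--     return {"response": formatted_response}
-- ===== SOURCE B (Python) =====
-- KEYS = ("Malnutrition Risk Level", "Key Deficiency Noticed", "Immediate Advice")
--
--
-- def _section(response, key):
--     start = response.find(key)
--     if start == -1:
--         return ""
--     j = start + 1
--     n = len(response)
--     while j < n and not any(response.startswith(k, j) for k in KEYS):
--         j += 1
--     return response[start + len(key) + 1 : j].strip()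
--
--
-- def extract_and_format_answer(response):
--     a, b, c = (_section(response, k) for k in KEYS)
--     return {
--         "response": "Malnutrition Risk Level:\n%s\n\n"
--         "Key Deficiency Noticed:\n%s\n\n"
--         "Immediate Advice:\n%s" % (a, b, c)
--     }
-- ===== Notes on version B (the rewrite author's own statement) =====
-- stated objective: alternative
-- what changed: B drops A's mutated dict and per-key min over find(k, start+1) across all keys, instead computing each section's end with a single forward scan to the next position where any of the three keys starts (startswith), and formatting directly from the three section values.
import Mathlib
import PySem

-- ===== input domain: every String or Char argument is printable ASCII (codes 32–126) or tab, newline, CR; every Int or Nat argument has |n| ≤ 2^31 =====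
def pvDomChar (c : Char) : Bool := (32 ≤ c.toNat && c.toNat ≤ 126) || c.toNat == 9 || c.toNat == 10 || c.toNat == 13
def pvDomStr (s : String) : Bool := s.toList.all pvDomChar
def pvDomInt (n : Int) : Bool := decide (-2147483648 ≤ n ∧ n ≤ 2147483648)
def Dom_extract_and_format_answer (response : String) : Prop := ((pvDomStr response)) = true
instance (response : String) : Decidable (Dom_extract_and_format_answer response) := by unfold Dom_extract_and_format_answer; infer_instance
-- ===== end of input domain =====

-- B replaces A's per-key "min over find(k, start+1) for all three keys" with a single forward scan
-- to the next position where any key starts (objective: alternative decomposition, same result).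

-- ===== PORT A =====
-- literal transliteration of A: a dict of three sections; per key, find + min over findFrom of every key
def extract_and_format_answer (response : String) : List (String × String) :=
  let sections0 : PySem.Dict String String :=
    ((PySem.Dict.empty.insert "Malnutrition Risk Level" "").insert "Key Deficiency Noticed" "").insert "Immediate Advice" ""
  -- Python iterates sections.keys(); the loop only overwrites values, so the key view is the
  -- key list of the initial dict throughout (keys sections0).
  let sections := (PySem.Dict.keys sections0).foldl (fun sections key =>
    let start_idx := PySem.Str.find response key
    if start_idx ≠ -1 then
      -- min(...): the Python list always ends with len(response), so it is nonempty; .getD 0 is unreachable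
      let end_idx := (PySem.List.min?
        ((((PySem.Dict.keys sections0).map (fun k => PySem.Str.findFrom response k (start_idx + 1))).filter
            (fun v => v ≠ -1)) ++ [(PySem.Str.len response : Int)]) (fun x => x)).getD 0
      sections.insert key (PySem.Str.strip (PySem.Str.slice response
        (some (start_idx + (PySem.Str.len key : Int) + 1)) (some end_idx)))
    else sections) sections0
  -- the f-string, assembled on the List Char side (String.ofList of the concatenated pieces)
  [("response", String.ofList (
    "Malnutrition Risk Level:\n".toList ++ (sections.getD "Malnutrition Risk Level" "").toList ++
    "\n\nKey Deficiency Noticed:\n".toList ++ (sections.getD "Key Deficiency Noticed" "").toList ++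
    "\n\nImmediate Advice:\n".toList ++ (sections.getD "Immediate Advice" "").toList))]

-- ===== PORT B =====
def pvKeysC : List (List Char) :=
  ["Malnutrition Risk Level".toList, "Key Deficiency Noticed".toList, "Immediate Advice".toList]

-- the while loop of Source B's _section: advance j until some key starts at j or j = len(response);
-- response.startswith(k, j) with 0 ≤ j is exactly "k is a prefix of s.drop j" (exact on this domain)
def pvScanEnd (s : List Char) (j : Nat) : Nat :=
  if j < s.length then
    if pvKeysC.any (fun k => k.isPrefixOf (s.drop j)) then j
    else pvScanEnd s (j + 1)
  else j
termination_by s.length - j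

-- Source B's _section (the slice has nonnegative in-range bounds, so it is drop/take)
def pvSection (s : List Char) (key : List Char) : List Char :=
  let start := PySem.Chars.find s key
  if start = -1 then []
  else
    let i := start.toNat + key.length + 1
    PySem.Chars.strip ((s.drop i).take (pvScanEnd s (start.toNat + 1) - i))

def extract_and_format_answer_alt (response : String) : List (String × String) :=
  let s := response.toList
  [("response", String.ofList (
    "Malnutrition Risk Level:\n".toList ++ pvSection s "Malnutrition Risk Level".toList ++
    "\n\nKey Deficiency Noticed:\n".toList ++ pvSection s "Key Deficiency Noticed".toList ++
    "\n\nImmediate Advice:\n".toList ++ pvSection s "Immediate Advice".toList))]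

-- ===== PRECONDITION & SPEC =====
def Spec_extract_and_format_answer (response : String) (out : List (String × String)) : Prop := out = extract_and_format_answer_alt response
instance (response : String) (out : List (String × String)) : Decidable (Spec_extract_and_format_answer response out) := by unfold Spec_extract_and_format_answer; infer_instance

-- ===== CLAIM (what is proved, stated in full; the proofs are below) =====
def Claim_equal_extract_and_format_answer : Prop := ∀ (response : String), Dom_extract_and_format_answer response → Spec_extract_and_format_answer response (extract_and_format_answer response)

-- ===== LEMMAS AND PROOFS =====

-- A's end_idx expression, at the Chars level
def pvEndA (s : List Char) (j : Int) : Int :=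
  (PySem.List.min? (((pvKeysC.map (fun k => PySem.Chars.findFrom s k j none)).filter
      (fun v => v ≠ -1)) ++ [(s.length : Int)]) (fun x => x)).getD 0

lemma pvKeysC_ne_nil : ∀ k ∈ pvKeysC, k ≠ [] := by decide

lemma pvInfixDrop (k s : List Char) (j : Nat) : k <:+: s.drop j ↔ ∃ i, k <+: s.drop (j + i) := by
  constructor
  · intro h
    obtain ⟨i, hi⟩ := (PySem.Chars.exists_prefix_drop_iff_isIn (s := s.drop j) (sub := k)).2
      (by rwa [PySem.Chars.isIn_iff_infix])
    rw [List.drop_drop] at hi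
    exact ⟨i, hi⟩
  · rintro ⟨i, hi⟩
    refine hi.isInfix.trans ?_
    have h1 : (s.drop j).drop i <:+ s.drop j := List.drop_suffix i (s.drop j)
    rw [List.drop_drop] at h1
    exact h1.isInfix

lemma pvInfixSucc (k s : List Char) (j : Nat) (hnp : ¬ k <+: s.drop j) :
    k <:+: s.drop j ↔ k <:+: s.drop (j + 1) := by
  rw [pvInfixDrop, pvInfixDrop]
  constructor
  · rintro ⟨i, hi⟩
    cases i with
    | zero => exact absurd (by simpa using hi) hnp
    | succ m => exact ⟨m, by rwa [show j + 1 + m = j + (m + 1) by omega]⟩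
  · rintro ⟨i, hi⟩
    exact ⟨i + 1, by rwa [show j + (i + 1) = j + 1 + i by omega]⟩

-- one step of Python's find(k, j): either k starts at j, or search from j+1
lemma pvStep (s k : List Char) (j : Nat) (hj : j < s.length) :
    PySem.Chars.findFrom s k (j : Int) none =
      if k <+: s.drop j then (j : Int) else PySem.Chars.findFrom s k ((j + 1 : Nat) : Int) none := by
  by_cases hp : k <+: s.drop j
  · rw [if_pos hp]
    have hne : PySem.Chars.findFrom s k (j : Int) none ≠ -1 := fun h =>
      ((PySem.Chars.findFrom_natCast_eq_neg_one_iff s k j hj.le).1 h) hp.isInfix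
    obtain ⟨h1, h2, h3⟩ := PySem.Chars.findFrom_natCast_spec s k j hj.le hne
    by_contra hne2
    have hlt : j < (PySem.Chars.findFrom s k (j : Int) none).toNat := by omega
    exact h3 j le_rfl hlt hp
  · rw [if_neg hp]
    have hiff := pvInfixSucc k s j hp
    by_cases hin : k <:+: s.drop (j + 1)
    · have hne1 : PySem.Chars.findFrom s k (j : Int) none ≠ -1 := fun h =>
        ((PySem.Chars.findFrom_natCast_eq_neg_one_iff s k j hj.le).1 h) (hiff.2 hin)
      have hne2 : PySem.Chars.findFrom s k ((j + 1 : Nat) : Int) none ≠ -1 := fun h =>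
        ((PySem.Chars.findFrom_natCast_eq_neg_one_iff s k (j + 1) (by omega)).1 h) hin
      obtain ⟨f1, f2, f3⟩ := PySem.Chars.findFrom_natCast_spec s k j hj.le hne1
      obtain ⟨g1, g2, g3⟩ := PySem.Chars.findFrom_natCast_spec s k (j + 1) (by omega) hne2
      set f := PySem.Chars.findFrom s k (j : Int) none with hf
      set g := PySem.Chars.findFrom s k ((j + 1 : Nat) : Int) none with hg
      have hfj : j + 1 ≤ f.toNat := by
        rcases Nat.lt_or_ge j f.toNat with h | h
        · omega
        · exfalso
          have : f.toNat = j := by omega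
          exact hp (this ▸ f2)
      have hng : ¬ f.toNat < g.toNat := fun h => g3 f.toNat hfj h f2
      have hnf : ¬ g.toNat < f.toNat := fun h => f3 g.toNat (by push_cast at g1; omega) h g2
      omega
    · have h1 : PySem.Chars.findFrom s k (j : Int) none = -1 := by
        rw [PySem.Chars.findFrom_natCast_eq_neg_one_iff s k j hj.le]
        exact fun h => hin (hiff.1 h)
      have h2 : PySem.Chars.findFrom s k ((j + 1 : Nat) : Int) none = -1 := by
        rw [PySem.Chars.findFrom_natCast_eq_neg_one_iff s k (j + 1) (by omega)]
        exact hin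
      rw [h1, h2]

-- A's min over per-key finds from j equals B's forward scan from j
lemma pvMinEqScan (s : List Char) (j : Nat) (hj : j ≤ s.length) :
    pvEndA s (j : Int) = (pvScanEnd s j : Int) := by
  induction hfuel : s.length - j generalizing j with
  | zero =>
    have hj' : j = s.length := by omega
    subst hj'
    rw [pvScanEnd, if_neg (by omega)]
    have hfil : (pvKeysC.map (fun k => PySem.Chars.findFrom s k (s.length : Int) none)).filter
        (fun v => v ≠ -1) = [] := by
      rw [List.filter_eq_nil_iff]
      intro a ha
      obtain ⟨k, hk, rfl⟩ := List.mem_map.1 ha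
      have : PySem.Chars.findFrom s k (s.length : Int) none = -1 := by
        rw [PySem.Chars.findFrom_natCast_eq_neg_one_iff s k s.length le_rfl]
        simp [List.drop_length]
        exact pvKeysC_ne_nil k hk
      simp [this]
    rw [pvEndA, hfil]
    simp [PySem.List.min?]
  | succ n ih =>
    have hlt : j < s.length := by omega
    rw [pvScanEnd, if_pos hlt]
    by_cases hany : pvKeysC.any (fun k => k.isPrefixOf (s.drop j)) = true
    · rw [if_pos hany]
      obtain ⟨k0, hk0, hp0⟩ := List.any_eq_true.1 hany
      have hp0' : k0 <+: s.drop j := List.isPrefixOf_iff_prefix.1 hp0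
      have hf0 : PySem.Chars.findFrom s k0 (j : Int) none = (j : Int) := by
        rw [pvStep s k0 j hlt, if_pos hp0']
      set L := ((pvKeysC.map (fun k => PySem.Chars.findFrom s k (j : Int) none)).filter
          (fun v => v ≠ -1)) ++ [(s.length : Int)] with hL
      have hmemj : (j : Int) ∈ L := by
        rw [hL]
        refine List.mem_append_left _ (List.mem_filter.2 ⟨?_, by simp⟩)
        exact List.mem_map.2 ⟨k0, hk0, hf0⟩
      have hlb : ∀ y ∈ L, (j : Int) ≤ y := by
        intro y hy
        rcases List.mem_append.1 hy with h | h
        · obtain ⟨hmem, hne⟩ := List.mem_filter.1 h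
          obtain ⟨k, hk, rfl⟩ := List.mem_map.1 hmem
          have hne' : PySem.Chars.findFrom s k (j : Int) none ≠ -1 := by simpa using hne
          exact (PySem.Chars.findFrom_natCast_spec s k j hlt.le hne').1
        · simp at h
          omega
      cases hmin : PySem.List.min? L (fun x => x) with
      | none =>
        exfalso
        rw [PySem.List.min?_eq_none_iff] at hmin
        simp [hL] at hmin
      | some m =>
        have h1 : m ≤ (j : Int) := PySem.List.min?_isMin hmin _ hmemj
        have h2 : (j : Int) ≤ m := hlb m (PySem.List.min?_mem hmin)
        rw [pvEndA, ← hL, hmin]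
        simp
        omega
    · rw [if_neg hany]
      have hmapeq : pvKeysC.map (fun k => PySem.Chars.findFrom s k (j : Int) none)
          = pvKeysC.map (fun k => PySem.Chars.findFrom s k ((j + 1 : Nat) : Int) none) := by
        refine List.map_congr_left ?_
        intro k hk
        rw [pvStep s k j hlt, if_neg ?_]
        intro hp
        exact hany (List.any_eq_true.2 ⟨k, hk, List.isPrefixOf_iff_prefix.2 hp⟩)
      have : pvEndA s (j : Int) = pvEndA s ((j + 1 : Nat) : Int) := by
        rw [pvEndA, pvEndA, hmapeq]
      rw [this]
      exact ih (j + 1) (by omega) (by omega)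

-- per key: A's strip(slice(start+len+1, min-of-finds)) equals Source B's _section
lemma pvSection_eq (s k : List Char) (hk : k ∈ pvKeysC) :
    (if PySem.Chars.find s k ≠ -1 then
       PySem.Chars.strip (PySem.Chars.slice s
         (some (PySem.Chars.find s k + (k.length : Int) + 1))
         (some (pvEndA s (PySem.Chars.find s k + 1))))
     else []) = pvSection s k := by
  by_cases hf : PySem.Chars.find s k = -1
  · rw [if_neg (by simpa using hf), pvSection]
    simp [hf]
  · have h0 : 0 ≤ PySem.Chars.find s k := by
      have := PySem.Chars.neg_one_le_find s k
      omega
    have hfind : PySem.Chars.find s k = ((PySem.Chars.find s k).toNat : Int) :=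
      (Int.toNat_of_nonneg h0).symm
    set st := (PySem.Chars.find s k).toNat with hst
    have hpre : k <+: s.drop st := (PySem.Chars.find_spec h0).1
    have hlelen : PySem.Chars.find s k ≤ (s.length : Int) := PySem.Chars.find_le_length s k
    have hstlen : st ≤ s.length := by omega
    have hkne : k ≠ [] := pvKeysC_ne_nil k hk
    have hklen : 1 ≤ k.length := List.length_pos_of_ne_nil hkne
    have hlen : st + k.length ≤ s.length := by
      have := hpre.length_le
      rw [List.length_drop] at this
      omega
    have hj : st + 1 ≤ s.length := by omega
    rw [if_pos hf, hfind]
    rw [show ((st : Int) + 1) = ((st + 1 : Nat) : Int) by push_cast; ring]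
    rw [pvMinEqScan s (st + 1) hj]
    rw [show ((st : Int) + (k.length : Int) + 1) = ((st + k.length + 1 : Nat) : Int) by push_cast; ring]
    rw [PySem.Chars.slice_eq_listSlice, PySem.List.slice_natCast]
    rw [pvSection]
    rw [if_neg hf]

-- the same per-key fact lifted to the String level, as it appears in port A
lemma pvValue_eq (response : String) (key : String) (hk : key.toList ∈ pvKeysC) :
    (if PySem.Str.find response key ≠ -1 then
       PySem.Str.strip (PySem.Str.slice response
         (some (PySem.Str.find response key + (PySem.Str.len key : Int) + 1))
         (some ((PySem.List.min?
           ((List.map (fun k => PySem.Str.findFrom response k (PySem.Str.find response key + 1))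
              ["Malnutrition Risk Level", "Key Deficiency Noticed", "Immediate Advice"]).filter
              (fun v => v ≠ -1) ++ [(PySem.Str.len response : Int)]) (fun x => x)).getD 0)))
     else "").toList = pvSection response.toList key.toList := by
  rw [← pvSection_eq response.toList key.toList hk]
  by_cases hf : PySem.Str.find response key = -1
  · have hf' : PySem.Chars.find response.toList key.toList = -1 := by
      simpa [PySem.Str.find_eq] using hf
    simp [hf']
  · have hf' : ¬ PySem.Chars.find response.toList key.toList = -1 := by
      simpa [PySem.Str.find_eq] using hf
    simp [hf', pvEndA, pvKeysC, PySem.Str.find_eq, PySem.Str.findFrom_eq, PySem.Str.len_eq,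
      PySem.Str.toList_strip, PySem.Str.toList_slice]

-- A's loop body (with the key view already evaluated to its literal key list), for the getD rewriting
def pvSections0 : PySem.Dict String String :=
  ((PySem.Dict.empty.insert "Malnutrition Risk Level" "").insert "Key Deficiency Noticed" "").insert "Immediate Advice" ""

def pvBody (response : String) (sections : PySem.Dict String String) (key : String) : PySem.Dict String String :=
  let start_idx := PySem.Str.find response key
  if start_idx ≠ -1 then
    let end_idx := (PySem.List.min?
      ((List.map (fun k => PySem.Str.findFrom response k (start_idx + 1))
          ["Malnutrition Risk Level", "Key Deficiency Noticed", "Immediate Advice"]).filter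
          (fun v => v ≠ -1) ++ [(PySem.Str.len response : Int)]) (fun x => x)).getD 0
    sections.insert key (PySem.Str.strip (PySem.Str.slice response
      (some (start_idx + (PySem.Str.len key : Int) + 1)) (some end_idx)))
  else sections

lemma pvBody_getD_ne (response : String) (d : PySem.Dict String String) (key KEY dflt : String)
    (h : KEY ≠ key) : (pvBody response d key).getD KEY dflt = d.getD KEY dflt := by
  simp only [pvBody]
  split_ifs with hf
  · simp [PySem.Dict.getD_insert, h]
  · rfl

lemma pvBody_getD_self (response : String) (d : PySem.Dict String String) (key : String)
    (hk : key.toList ∈ pvKeysC) (hd : d.getD key "" = "") :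
    ((pvBody response d key).getD key "").toList = pvSection response.toList key.toList := by
  rw [← pvValue_eq response key hk]
  simp only [pvBody]
  split_ifs with hf
  · simp
  · rw [hd]

-- ===== VERDICT (by name: the statement is the Claim_ definition above) =====
theorem extract_and_format_answer_spec : Claim_equal_extract_and_format_answer := by
  intro response _
  unfold Spec_extract_and_format_answer
  have hA : extract_and_format_answer response =
      [("response", String.ofList (
        "Malnutrition Risk Level:\n".toList ++
          ((pvBody response (pvBody response (pvBody response pvSections0
            "Malnutrition Risk Level") "Key Deficiency Noticed") "Immediate Advice").getD
            "Malnutrition Risk Level" "").toList ++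
        "\n\nKey Deficiency Noticed:\n".toList ++
          ((pvBody response (pvBody response (pvBody response pvSections0
            "Malnutrition Risk Level") "Key Deficiency Noticed") "Immediate Advice").getD
            "Key Deficiency Noticed" "").toList ++
        "\n\nImmediate Advice:\n".toList ++
          ((pvBody response (pvBody response (pvBody response pvSections0
            "Malnutrition Risk Level") "Key Deficiency Noticed") "Immediate Advice").getD
            "Immediate Advice" "").toList))] := rfl
  rw [hA]
  have e1 : ((pvBody response (pvBody response (pvBody response pvSections0
      "Malnutrition Risk Level") "Key Deficiency Noticed") "Immediate Advice").getD
      "Malnutrition Risk Level" "").toList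
      = pvSection response.toList "Malnutrition Risk Level".toList := by
    rw [pvBody_getD_ne _ _ _ _ _ (by decide), pvBody_getD_ne _ _ _ _ _ (by decide)]
    exact pvBody_getD_self _ _ _ (by decide) rfl
  have e2 : ((pvBody response (pvBody response (pvBody response pvSections0
      "Malnutrition Risk Level") "Key Deficiency Noticed") "Immediate Advice").getD
      "Key Deficiency Noticed" "").toList
      = pvSection response.toList "Key Deficiency Noticed".toList := by
    rw [pvBody_getD_ne _ _ _ _ _ (by decide)]
    refine pvBody_getD_self _ _ _ (by decide) ?_
    rw [pvBody_getD_ne _ _ _ _ _ (by decide)]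
    rfl
  have e3 : ((pvBody response (pvBody response (pvBody response pvSections0
      "Malnutrition Risk Level") "Key Deficiency Noticed") "Immediate Advice").getD
      "Immediate Advice" "").toList
      = pvSection response.toList "Immediate Advice".toList := by
    refine pvBody_getD_self _ _ _ (by decide) ?_
    rw [pvBody_getD_ne _ _ _ _ _ (by decide), pvBody_getD_ne _ _ _ _ _ (by decide)]
    rfl
  rw [e1, e2, e3]
  rfl
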